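-- pv_equiv track=rewrite | github.com/sehun0519/test | yacht_game.py | calculate_possible_score
-- ===== SOURCE A (Python) =====
-- def calculate_possible_score(category, dice_values):
--     """Calculate possible score for a given category with current dice"""
--
--     if category == 'Aces':
--         return sum(d for d in dice_values if d == 1)
--     elif category == 'Twos':
--         return sum(d for d in dice_values if d == 2)
--     elif category == 'Threes':
--         return sum(d for d in dice_values if d == 3)
--     elif category == 'Fours':
--         return sum(d for d in dice_values if d == 4)
--     elif category == 'Fives':
--         return sum(d for d in dice_values if d == 5)
--     elif category == 'Sixes':
--         return sum(d for d in dice_values if d == 6)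
--     elif category == 'Choice':
--         return sum(dice_values)
--     elif category == 'Four of a Kind':
--         for value in range(1, 7):
--             if dice_values.count(value) >= 4:
--                 return value * 4
--         return 0
--     elif category == 'Full House':
--         has_three = False
--         has_two = False
--         for value in range(1, 7):
--             if dice_values.count(value) == 3:
--                 has_three = True
--             elif dice_values.count(value) == 2:
--                 has_two = True
--         if has_three and has_two:
--             return sum(dice_values)
--         return 0
--     elif category == 'Small Straight':
--         # Check for 1-2-3-4 or 2-3-4-5 or 3-4-5-6
--         sorted_dice = sorted(dice_values)
--         unique_sorted = sorted(set(sorted_dice))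
--
--         if len(unique_sorted) >= 4:
--             for i in range(len(unique_sorted) - 3):
--                 if unique_sorted[i] + 1 == unique_sorted[i+1] and \
--                    unique_sorted[i+1] + 1 == unique_sorted[i+2] and \
--                    unique_sorted[i+2] + 1 == unique_sorted[i+3]:
--                     return 15
--         return 0
--     elif category == 'Large Straight':
--         # Check for 1-2-3-4-5 or 2-3-4-5-6
--         sorted_dice = sorted(dice_values)
--         if sorted_dice == [1, 2, 3, 4, 5] or sorted_dice == [2, 3, 4, 5, 6]:
--             return 30
--         return 0
--     elif category == 'Yacht':
--         if all(d == dice_values[0] for d in dice_values):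
--             return 50
--         return 0
--     return 0
-- ===== SOURCE B (Python) =====
-- def calculate_possible_score(category, dice_values):
--     """Calculate possible score for a given category with current dice"""
--     counts = {}
--     for d in dice_values:
--         counts[d] = counts.get(d, 0) + 1
--     total = sum(dice_values)
--     s = set(dice_values)
--     distinct = sorted(s)
--     quads = [n for n in range(1, 7) if counts.get(n, 0) >= 4]
--     faces = [counts.get(n, 0) for n in range(1, 7)]
--     table = {
--         'Aces': 1 * counts.get(1, 0),
--         'Twos': 2 * counts.get(2, 0),
--         'Threes': 3 * counts.get(3, 0),
--         'Fours': 4 * counts.get(4, 0),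
--         'Fives': 5 * counts.get(5, 0),
--         'Sixes': 6 * counts.get(6, 0),
--         'Choice': total,
--         'Four of a Kind': 4 * quads[0] if quads else 0,
--         'Full House': total if 3 in faces and 2 in faces else 0,
--         'Small Straight': 15 if any(x + 1 in s and x + 2 in s and x + 3 in s for x in s) else 0,
--         'Large Straight': 30 if (len(dice_values) == 5 and len(distinct) == 5
--                                  and distinct[4] - distinct[0] == 4 and distinct[0] in (1, 2)) else 0,
--         'Yacht': 50 if len(s) <= 1 else 0,
--     }
--     return table.get(category, 0)
-- ===== Notes on version B (the rewrite author's own statement) =====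
-- stated objective: alternative
-- what changed: B replaces A's if/elif branch chain with per-branch scanning loops by a staged pipeline: one pass builds a value-count dictionary, shared statistics (total, distinct set, sorted distinct, quads, face counts) are computed once, a complete category-to-score table is then built and the result is a single table lookup with default 0; …
import Mathlib
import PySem

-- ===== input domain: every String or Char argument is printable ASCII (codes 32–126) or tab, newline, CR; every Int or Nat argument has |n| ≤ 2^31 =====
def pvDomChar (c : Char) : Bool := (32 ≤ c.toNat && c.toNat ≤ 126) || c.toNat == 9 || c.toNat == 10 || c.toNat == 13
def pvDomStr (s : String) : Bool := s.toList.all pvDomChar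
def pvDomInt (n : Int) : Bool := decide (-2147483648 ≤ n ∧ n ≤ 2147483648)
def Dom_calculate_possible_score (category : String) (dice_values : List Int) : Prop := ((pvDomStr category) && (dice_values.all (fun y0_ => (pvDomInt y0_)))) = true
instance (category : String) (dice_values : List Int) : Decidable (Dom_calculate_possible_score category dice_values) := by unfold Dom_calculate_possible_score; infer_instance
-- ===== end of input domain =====

-- B replaces A's if/elif chain with per-branch scans by one staged pipeline: a count dictionary and shared
-- statistics built once, then a complete category→score table and a single lookup (objective: alternative).

-- ===== PORT A =====
-- 'for value in range(1,7): if dice_values.count(value) >= 4: return value * 4' — early-return loop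
def pvAFour (dice : List Int) : List Int → Int
  | [] => 0
  | v :: rest => if 4 ≤ PySem.List.count dice v then v * 4 else pvAFour dice rest

-- the Small Straight index loop; all accessed indices are in range, so pyGetD _ _ 0 is exact here
def pvASmall (us : List Int) : List Int → Int
  | [] => 0
  | i :: rest =>
    if (PySem.List.pyGetD us i 0 + 1 == PySem.List.pyGetD us (i + 1) 0) &&
       (PySem.List.pyGetD us (i + 1) 0 + 1 == PySem.List.pyGetD us (i + 2) 0) &&
       (PySem.List.pyGetD us (i + 2) 0 + 1 == PySem.List.pyGetD us (i + 3) 0) then 15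
    else pvASmall us rest

def calculate_possible_score (category : String) (dice_values : List Int) : Int :=
  if category == "Aces" then (dice_values.filter (fun d => d == 1)).sum
  else if category == "Twos" then (dice_values.filter (fun d => d == 2)).sum
  else if category == "Threes" then (dice_values.filter (fun d => d == 3)).sum
  else if category == "Fours" then (dice_values.filter (fun d => d == 4)).sum
  else if category == "Fives" then (dice_values.filter (fun d => d == 5)).sum
  else if category == "Sixes" then (dice_values.filter (fun d => d == 6)).sum
  else if category == "Choice" then dice_values.sum
  else if category == "Four of a Kind" then pvAFour dice_values (PySem.List.pyRange 1 7 1)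
  else if category == "Full House" then
    let fl := (PySem.List.pyRange 1 7 1).foldl
      (fun (p : Bool × Bool) v =>
        if PySem.List.count dice_values v == 3 then (true, p.2)
        else if PySem.List.count dice_values v == 2 then (p.1, true)
        else p) (false, false)
    if fl.1 && fl.2 then dice_values.sum else 0
  else if category == "Small Straight" then
    let sorted_dice := PySem.List.sorted dice_values (fun x => x) false
    let unique_sorted := PySem.List.sorted (PySem.Set.ofList sorted_dice) (fun x => x) false
    if 4 ≤ unique_sorted.length then
      pvASmall unique_sorted (PySem.List.pyRange 0 ((unique_sorted.length : Int) - 3) 1)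
    else 0
  else if category == "Large Straight" then
    let sorted_dice := PySem.List.sorted dice_values (fun x => x) false
    if sorted_dice == [1, 2, 3, 4, 5] || sorted_dice == [2, 3, 4, 5, 6] then 30 else 0
  else if category == "Yacht" then
    if dice_values.all (fun d => some d == PySem.List.pyGet? dice_values 0) then 50 else 0
  else 0

-- ===== PORT B =====
-- the Python dict literal {'Aces': …, …, 'Yacht': …}, keys in source order
def pvTableB (v1 v2 v3 v4 v5 v6 v7 v8 v9 v10 v11 v12 : Int) : PySem.Dict String Int :=
  PySem.Dict.ofList [("Aces", v1), ("Twos", v2), ("Threes", v3), ("Fours", v4), ("Fives", v5),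
    ("Sixes", v6), ("Choice", v7), ("Four of a Kind", v8), ("Full House", v9),
    ("Small Straight", v10), ("Large Straight", v11), ("Yacht", v12)]

def calculate_possible_score_alt (category : String) (dice_values : List Int) : Int :=
  let counts : PySem.Dict Int Int :=
    dice_values.foldl (fun d x => d.insert x (d.getD x 0 + 1)) PySem.Dict.empty
  let total := dice_values.sum
  let s := PySem.Set.ofList dice_values
  let distinct := PySem.List.sorted s (fun x => x) false
  let quads := (PySem.List.pyRange 1 7 1).filter (fun n => decide (4 ≤ counts.getD n 0))
  let faces := (PySem.List.pyRange 1 7 1).map (fun n => counts.getD n 0)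
  -- distinct[4]/distinct[0]: Python only evaluates them under the length-5 guard; pyGetD's default 0
  -- is never the decisive value since the conjunction is already false when an index is out of range
  let table := pvTableB
    (1 * counts.getD 1 0) (2 * counts.getD 2 0) (3 * counts.getD 3 0)
    (4 * counts.getD 4 0) (5 * counts.getD 5 0) (6 * counts.getD 6 0)
    total
    (match quads with | q :: _ => 4 * q | [] => 0)
    (if faces.contains 3 && faces.contains 2 then total else 0)
    (if s.any (fun x => s.contains (x + 1) && s.contains (x + 2) && s.contains (x + 3)) then 15 else 0)
    (if decide (dice_values.length = 5) && decide (distinct.length = 5) &&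
        (PySem.List.pyGetD distinct 4 0 - PySem.List.pyGetD distinct 0 0 == 4) &&
        (PySem.List.pyGetD distinct 0 0 == 1 || PySem.List.pyGetD distinct 0 0 == 2) then 30 else 0)
    (if PySem.Set.len s ≤ 1 then 50 else 0)
  table.getD category 0

-- ===== PRECONDITION & SPEC =====
def Spec_calculate_possible_score (category : String) (dice_values : List Int) (out : Int) : Prop := out = calculate_possible_score_alt category dice_values
instance (category : String) (dice_values : List Int) (out : Int) : Decidable (Spec_calculate_possible_score category dice_values out) := by unfold Spec_calculate_possible_score; infer_instance

-- ===== CLAIM (what is proved, stated in full; the proofs are below) =====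
def Claim_equal_calculate_possible_score : Prop := ∀ (category : String) (dice_values : List Int), Dom_calculate_possible_score category dice_values → Spec_calculate_possible_score category dice_values (calculate_possible_score category dice_values)

-- ===== LEMMAS AND PROOFS =====

-- looking up each literal key of the dict literal yields its value
lemma pv_get_1 (v1 v2 v3 v4 v5 v6 v7 v8 v9 v10 v11 v12 : Int) :
    (pvTableB v1 v2 v3 v4 v5 v6 v7 v8 v9 v10 v11 v12).getD "Aces" 0 = v1 := by
  simp [pvTableB, PySem.Dict.ofList, PySem.Dict.update, PySem.Dict.getD_insert]

lemma pv_get_2 (v1 v2 v3 v4 v5 v6 v7 v8 v9 v10 v11 v12 : Int) :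
    (pvTableB v1 v2 v3 v4 v5 v6 v7 v8 v9 v10 v11 v12).getD "Twos" 0 = v2 := by
  simp [pvTableB, PySem.Dict.ofList, PySem.Dict.update, PySem.Dict.getD_insert]

lemma pv_get_3 (v1 v2 v3 v4 v5 v6 v7 v8 v9 v10 v11 v12 : Int) :
    (pvTableB v1 v2 v3 v4 v5 v6 v7 v8 v9 v10 v11 v12).getD "Threes" 0 = v3 := by
  simp [pvTableB, PySem.Dict.ofList, PySem.Dict.update, PySem.Dict.getD_insert]

lemma pv_get_4 (v1 v2 v3 v4 v5 v6 v7 v8 v9 v10 v11 v12 : Int) :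
    (pvTableB v1 v2 v3 v4 v5 v6 v7 v8 v9 v10 v11 v12).getD "Fours" 0 = v4 := by
  simp [pvTableB, PySem.Dict.ofList, PySem.Dict.update, PySem.Dict.getD_insert]

lemma pv_get_5 (v1 v2 v3 v4 v5 v6 v7 v8 v9 v10 v11 v12 : Int) :
    (pvTableB v1 v2 v3 v4 v5 v6 v7 v8 v9 v10 v11 v12).getD "Fives" 0 = v5 := by
  simp [pvTableB, PySem.Dict.ofList, PySem.Dict.update, PySem.Dict.getD_insert]

lemma pv_get_6 (v1 v2 v3 v4 v5 v6 v7 v8 v9 v10 v11 v12 : Int) :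
    (pvTableB v1 v2 v3 v4 v5 v6 v7 v8 v9 v10 v11 v12).getD "Sixes" 0 = v6 := by
  simp [pvTableB, PySem.Dict.ofList, PySem.Dict.update, PySem.Dict.getD_insert]

lemma pv_get_7 (v1 v2 v3 v4 v5 v6 v7 v8 v9 v10 v11 v12 : Int) :
    (pvTableB v1 v2 v3 v4 v5 v6 v7 v8 v9 v10 v11 v12).getD "Choice" 0 = v7 := by
  simp [pvTableB, PySem.Dict.ofList, PySem.Dict.update, PySem.Dict.getD_insert]

lemma pv_get_8 (v1 v2 v3 v4 v5 v6 v7 v8 v9 v10 v11 v12 : Int) :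
    (pvTableB v1 v2 v3 v4 v5 v6 v7 v8 v9 v10 v11 v12).getD "Four of a Kind" 0 = v8 := by
  simp [pvTableB, PySem.Dict.ofList, PySem.Dict.update, PySem.Dict.getD_insert]

lemma pv_get_9 (v1 v2 v3 v4 v5 v6 v7 v8 v9 v10 v11 v12 : Int) :
    (pvTableB v1 v2 v3 v4 v5 v6 v7 v8 v9 v10 v11 v12).getD "Full House" 0 = v9 := by
  simp [pvTableB, PySem.Dict.ofList, PySem.Dict.update, PySem.Dict.getD_insert]

lemma pv_get_10 (v1 v2 v3 v4 v5 v6 v7 v8 v9 v10 v11 v12 : Int) :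
    (pvTableB v1 v2 v3 v4 v5 v6 v7 v8 v9 v10 v11 v12).getD "Small Straight" 0 = v10 := by
  simp [pvTableB, PySem.Dict.ofList, PySem.Dict.update, PySem.Dict.getD_insert]

lemma pv_get_11 (v1 v2 v3 v4 v5 v6 v7 v8 v9 v10 v11 v12 : Int) :
    (pvTableB v1 v2 v3 v4 v5 v6 v7 v8 v9 v10 v11 v12).getD "Large Straight" 0 = v11 := by
  simp [pvTableB, PySem.Dict.ofList, PySem.Dict.update, PySem.Dict.getD_insert]

lemma pv_get_12 (v1 v2 v3 v4 v5 v6 v7 v8 v9 v10 v11 v12 : Int) :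
    (pvTableB v1 v2 v3 v4 v5 v6 v7 v8 v9 v10 v11 v12).getD "Yacht" 0 = v12 := by
  simp [pvTableB, PySem.Dict.ofList, PySem.Dict.update]

-- a category that is none of the twelve keys misses the table
lemma pv_table_miss (c : String) (v1 v2 v3 v4 v5 v6 v7 v8 v9 v10 v11 v12 : Int)
    (h1 : c ≠ "Aces") (h2 : c ≠ "Twos") (h3 : c ≠ "Threes") (h4 : c ≠ "Fours")
    (h5 : c ≠ "Fives") (h6 : c ≠ "Sixes") (h7 : c ≠ "Choice") (h8 : c ≠ "Four of a Kind")
    (h9 : c ≠ "Full House") (h10 : c ≠ "Small Straight") (h11 : c ≠ "Large Straight")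
    (h12 : c ≠ "Yacht") :
    (pvTableB v1 v2 v3 v4 v5 v6 v7 v8 v9 v10 v11 v12).getD c 0 = 0 := by
  simp [pvTableB, PySem.Dict.ofList, PySem.Dict.update, PySem.Dict.getD_insert,
    h1, h2, h3, h4, h5, h6, h7, h8, h9, h10, h11, h12]

-- sum of the elements equal to n is n times their count
lemma pv_sum_filter (n : Int) (l : List Int) :
    (l.filter (fun d => d == n)).sum = n * (PySem.List.count l n : Int) := by
  induction l with
  | nil => simp [PySem.List.count]
  | cons d t ih =>
    by_cases h : d = n
    · simp [h, ih, PySem.List.count_eq]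
      ring
    · simp [h, ih, PySem.List.count_eq]

-- the counter loop's lookup is the count
lemma pv_counts_getD (dice : List Int) (n : Int) :
    (dice.foldl (fun d x => d.insert x (d.getD x 0 + 1)) (PySem.Dict.empty : PySem.Dict Int Int)).getD n 0
      = ((List.count n dice : ℕ) : Int) := by
  rw [PySem.Dict.foldl_insert_getD_add_one_eq_counter, PySem.Dict.getD_counter]

-- A's early-return scan over candidate values equals B's first filtered candidate
lemma pv_four_loop (dice : List Int) (vs : List Int) :
    pvAFour dice vs =
      (match vs.filter (fun v => decide (4 ≤ (PySem.List.count dice v : Int))) with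
       | q :: _ => 4 * q
       | [] => 0) := by
  induction vs with
  | nil => simp [pvAFour]
  | cons v rest ih =>
    by_cases h : 4 ≤ List.count v dice
    · simp [pvAFour, PySem.List.count_eq, h, mul_comm]
    · simp [pvAFour, PySem.List.count_eq, h, ih]

-- A's flag-setting fold computes 'some value has count 3' and 'some value has count 2'
lemma pv_flags (cnt : Int → ℕ) (vs : List Int) : ∀ (a b : Bool),
    vs.foldl (fun (p : Bool × Bool) v =>
        if cnt v == 3 then (true, p.2)
        else if cnt v == 2 then (p.1, true)
        else p) (a, b)
      = (a || vs.any (fun v => cnt v == 3), b || vs.any (fun v => cnt v == 2)) := by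
  induction vs with
  | nil => simp
  | cons v rest ih =>
    intro a b
    by_cases h3 : cnt v = 3
    · rw [List.foldl_cons, if_pos (by simp [h3] : (cnt v == 3) = true), ih]
      simp [h3]
    · by_cases h2 : cnt v = 2
      · rw [List.foldl_cons, if_neg (by simp [h3] : ¬ (cnt v == 3) = true),
           if_pos (by simp [h2] : (cnt v == 2) = true), ih]
        simp [h2]
      · rw [List.foldl_cons, if_neg (by simp [h3] : ¬ (cnt v == 3) = true),
           if_neg (by simp [h2] : ¬ (cnt v == 2) = true), ih]
        simp only [List.any_cons]
        rw [beq_eq_false_iff_ne.mpr h3, beq_eq_false_iff_ne.mpr h2]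
        simp

-- the Small Straight window loop is an 'any' over its index list
lemma pv_small_loop (us : List Int) (vs : List Int) :
    pvASmall us vs =
      (if vs.any (fun i =>
          (PySem.List.pyGetD us i 0 + 1 == PySem.List.pyGetD us (i + 1) 0) &&
          (PySem.List.pyGetD us (i + 1) 0 + 1 == PySem.List.pyGetD us (i + 2) 0) &&
          (PySem.List.pyGetD us (i + 2) 0 + 1 == PySem.List.pyGetD us (i + 3) 0)) then 15 else 0) := by
  induction vs with
  | nil => simp [pvASmall]
  | cons i rest ih =>
    by_cases h : ((PySem.List.pyGetD us i 0 + 1 == PySem.List.pyGetD us (i + 1) 0) &&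
          (PySem.List.pyGetD us (i + 1) 0 + 1 == PySem.List.pyGetD us (i + 2) 0) &&
          (PySem.List.pyGetD us (i + 2) 0 + 1 == PySem.List.pyGetD us (i + 3) 0)) = true
    · rw [pvASmall, if_pos h]
      simp [List.any_cons, h]
    · rw [pvASmall, if_neg h, ih]
      simp [List.any_cons, h]

-- in a strictly increasing integer list, the successor of an element sits right after it
lemma pv_step (us : List Int) (hp : us.Pairwise (· < ·)) {a b : ℕ} (ha : a < us.length)
    (hb : b < us.length) (y : Int) (hya : us[a] = y) (hyb : us[b] = y + 1) :
    ∃ h : a + 1 < us.length, us[a + 1]'h = y + 1 := by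
  have hmono : ∀ i j (_ : i < us.length) (_ : j < us.length), i < j → us[i] < us[j] :=
    fun i j hi hj hij => (List.pairwise_iff_getElem.mp hp) i j hi hj hij
  have hab : a < b := by
    rcases lt_trichotomy a b with h | h | h
    · exact h
    · exfalso; subst h; omega
    · exfalso; have := hmono b a hb ha h; omega
  have h1 : a + 1 < us.length := by omega
  refine ⟨h1, ?_⟩
  have hlt : us[a] < us[a + 1] := hmono a (a + 1) ha h1 (by omega)
  have hle : us[a + 1] ≤ us[b] := by
    rcases eq_or_lt_of_le (by omega : a + 1 ≤ b) with h | h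
    · subst h; exact le_refl _
    · exact le_of_lt (hmono _ _ h1 hb h)
  omega

-- the window scan on the sorted dedup succeeds iff some x has x+1, x+2, x+3 present
lemma pv_small_iff (dice us : List Int) (hp : us.Pairwise (· < ·))
    (hm : ∀ x : Int, x ∈ us ↔ x ∈ dice) :
    (4 ≤ us.length ∧ ∃ i ∈ PySem.List.pyRange 0 ((us.length : Int) - 3) 1,
        PySem.List.pyGetD us i 0 + 1 = PySem.List.pyGetD us (i + 1) 0 ∧
        PySem.List.pyGetD us (i + 1) 0 + 1 = PySem.List.pyGetD us (i + 2) 0 ∧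
        PySem.List.pyGetD us (i + 2) 0 + 1 = PySem.List.pyGetD us (i + 3) 0)
      ↔ ∃ x ∈ dice, x + 1 ∈ dice ∧ x + 2 ∈ dice ∧ x + 3 ∈ dice := by
  constructor
  · rintro ⟨hlen, i, hi, h1, h2, h3⟩
    rw [PySem.List.mem_pyRange_one] at hi
    obtain ⟨hi0, hiu⟩ := hi
    obtain ⟨k, rfl⟩ : ∃ k : ℕ, i = (k : Int) := ⟨i.toNat, by omega⟩
    have hk3 : k + 3 < us.length := by omega
    simp only [show ((k : Int) + 1) = ((k + 1 : ℕ) : Int) from by push_cast; ring,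
      show ((k : Int) + 2) = ((k + 2 : ℕ) : Int) from by push_cast; ring,
      show ((k : Int) + 3) = ((k + 3 : ℕ) : Int) from by push_cast; ring,
      PySem.List.pyGetD_natCast] at h1 h2 h3
    rw [List.getD_eq_getElem us 0 (by omega), List.getD_eq_getElem us 0 (by omega)] at h1
    rw [List.getD_eq_getElem us 0 (by omega), List.getD_eq_getElem us 0 (by omega)] at h2
    rw [List.getD_eq_getElem us 0 (by omega), List.getD_eq_getElem us 0 (by omega)] at h3
    refine ⟨us[k], (hm _).mp (List.getElem_mem _), ?_, ?_, ?_⟩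
    · rw [show us[k] + 1 = us[k + 1] from by omega]
      exact (hm _).mp (List.getElem_mem _)
    · rw [show us[k] + 2 = us[k + 2] from by omega]
      exact (hm _).mp (List.getElem_mem _)
    · rw [show us[k] + 3 = us[k + 3] from by omega]
      exact (hm _).mp (List.getElem_mem _)
  · rintro ⟨x, hx, hx1, hx2, hx3⟩
    obtain ⟨j0, hj0, e0⟩ := List.mem_iff_getElem.mp ((hm x).mpr hx)
    obtain ⟨j1, hj1, e1⟩ := List.mem_iff_getElem.mp ((hm (x + 1)).mpr hx1)
    obtain ⟨j2, hj2, e2⟩ := List.mem_iff_getElem.mp ((hm (x + 2)).mpr hx2)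
    obtain ⟨j3, hj3, e3⟩ := List.mem_iff_getElem.mp ((hm (x + 3)).mpr hx3)
    obtain ⟨hs1, f1⟩ := pv_step us hp hj0 hj1 x e0 e1
    obtain ⟨hs2, f2⟩ := pv_step us hp hs1 hj2 (x + 1) f1 (by rw [e2]; ring)
    simp only [show j0 + 1 + 1 = j0 + 2 from by omega] at hs2 f2
    have f2' : us[j0 + 2]'hs2 = x + 2 := by rw [f2]; ring
    obtain ⟨hs3, f3⟩ := pv_step us hp hs2 hj3 (x + 2) f2' (by rw [e3]; ring)
    simp only [show j0 + 2 + 1 = j0 + 3 from by omega] at hs3 f3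
    have f3' : us[j0 + 3]'hs3 = x + 3 := by rw [f3]; ring
    refine ⟨by omega, (j0 : Int), ?_, ?_, ?_, ?_⟩
    · rw [PySem.List.mem_pyRange_one]
      constructor
      · omega
      · omega
    all_goals
      simp only [show ((j0 : Int) + 1) = ((j0 + 1 : ℕ) : Int) from by push_cast; ring,
        show ((j0 : Int) + 2) = ((j0 + 2 : ℕ) : Int) from by push_cast; ring,
        show ((j0 : Int) + 3) = ((j0 + 3 : ℕ) : Int) from by push_cast; ring,
        PySem.List.pyGetD_natCast]
    · rw [List.getD_eq_getElem us 0 (by omega), List.getD_eq_getElem us 0 (by omega), e0, f1]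
    · rw [List.getD_eq_getElem us 0 (by omega), List.getD_eq_getElem us 0 (by omega), f1, f2']
      ring
    · rw [List.getD_eq_getElem us 0 (by omega), List.getD_eq_getElem us 0 (by omega), f2', f3']
      ring

-- the window scan branch of A equals B's set-membership test
lemma pv_branch_small (dice : List Int) :
    (if 4 ≤ (PySem.List.sorted (PySem.Set.ofList (PySem.List.sorted dice (fun x => x) false)) (fun x => x) false).length then
       pvASmall (PySem.List.sorted (PySem.Set.ofList (PySem.List.sorted dice (fun x => x) false)) (fun x => x) false)
         (PySem.List.pyRange 0 (((PySem.List.sorted (PySem.Set.ofList (PySem.List.sorted dice (fun x => x) false)) (fun x => x) false).length : Int) - 3) 1)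
     else 0) =
    (if (PySem.Set.ofList dice).any
        (fun x => (PySem.Set.ofList dice).contains (x + 1) &&
                  (PySem.Set.ofList dice).contains (x + 2) &&
                  (PySem.Set.ofList dice).contains (x + 3)) then (15 : Int) else 0) := by
  have hp := PySem.List.sorted_ofList_pairwise_lt (PySem.List.sorted dice (fun x => x) false)
  have hm : ∀ x : Int,
      x ∈ PySem.List.sorted (PySem.Set.ofList (PySem.List.sorted dice (fun x => x) false)) (fun x => x) false
        ↔ x ∈ dice := fun x => by
    rw [PySem.List.mem_sorted, PySem.Set.mem_ofList, PySem.List.mem_sorted]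
  generalize hus : PySem.List.sorted (PySem.Set.ofList (PySem.List.sorted dice (fun x => x) false)) (fun x => x) false = us at hp hm ⊢
  rw [pv_small_loop]
  have hiff := pv_small_iff dice us hp hm
  have hB : ((PySem.Set.ofList dice).any
        (fun x => PySem.Set.contains (PySem.Set.ofList dice) (x + 1) &&
                  PySem.Set.contains (PySem.Set.ofList dice) (x + 2) &&
                  PySem.Set.contains (PySem.Set.ofList dice) (x + 3)) = true)
      ↔ (∃ x ∈ dice, x + 1 ∈ dice ∧ x + 2 ∈ dice ∧ x + 3 ∈ dice) := by
    simp [List.any_eq_true, Bool.and_eq_true, PySem.Set.mem_ofList,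
      and_assoc]
  have hA2 : (((PySem.List.pyRange 0 ((us.length : Int) - 3) 1).any (fun i =>
          (PySem.List.pyGetD us i 0 + 1 == PySem.List.pyGetD us (i + 1) 0) &&
          (PySem.List.pyGetD us (i + 1) 0 + 1 == PySem.List.pyGetD us (i + 2) 0) &&
          (PySem.List.pyGetD us (i + 2) 0 + 1 == PySem.List.pyGetD us (i + 3) 0))) = true)
      ↔ (∃ i ∈ PySem.List.pyRange 0 ((us.length : Int) - 3) 1,
          PySem.List.pyGetD us i 0 + 1 = PySem.List.pyGetD us (i + 1) 0 ∧
          PySem.List.pyGetD us (i + 1) 0 + 1 = PySem.List.pyGetD us (i + 2) 0 ∧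
          PySem.List.pyGetD us (i + 2) 0 + 1 = PySem.List.pyGetD us (i + 3) 0) := by
    simp [List.any_eq_true, Bool.and_eq_true, beq_iff_eq, and_assoc]
  by_cases hP : ∃ x ∈ dice, x + 1 ∈ dice ∧ x + 2 ∈ dice ∧ x + 3 ∈ dice
  · obtain ⟨hl, hex⟩ := hiff.mpr hP
    rw [if_pos hl, if_pos (hA2.mpr hex), if_pos (hB.mpr hP)]
  · have hBn : ¬ _ := fun h => hP (hB.mp h)
    by_cases hl : 4 ≤ us.length
    · rw [if_pos hl, if_neg (fun h => hP (hiff.mp ⟨hl, hA2.mp h⟩)), if_neg hBn]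
    · rw [if_neg hl, if_neg hBn]

-- sorted(dice) is one of the two straight lists iff 5 dice, 5 distinct, span 4, minimum 1 or 2
lemma pv_large2_iff (dice us : List Int) (hp : us.Pairwise (· < ·))
    (hm : ∀ x : Int, x ∈ us ↔ x ∈ dice)
    (hus : PySem.List.sorted (PySem.Set.ofList dice) (fun x => x) false = us) :
    (PySem.List.sorted dice (fun x => x) false = [1, 2, 3, 4, 5] ∨
     PySem.List.sorted dice (fun x => x) false = [2, 3, 4, 5, 6]) ↔
    (dice.length = 5 ∧ us.length = 5 ∧
     PySem.List.pyGetD us 4 0 - PySem.List.pyGetD us 0 0 = 4 ∧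
     (PySem.List.pyGetD us 0 0 = 1 ∨ PySem.List.pyGetD us 0 0 = 2)) := by
  have hget : ∀ (k : ℕ) (h5 : us.length = 5) (hk : k < 5),
      PySem.List.pyGetD us ((k : ℕ) : Int) 0 = us[k]'(by omega) := by
    intro k h5 hk
    rw [PySem.List.pyGetD_natCast, List.getD_eq_getElem us 0 (by omega)]
  constructor
  · rintro hL
    have key : ∀ L : List Int, L.Pairwise (· < ·) → L.length = 5 →
        PySem.List.sorted dice (fun x => x) false = L →
        dice.length = 5 ∧ us = L := by
      intro L hLp hL5 h
      have hperm : L.Perm dice := h ▸ (PySem.List.sorted_perm dice (fun x => x) false)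
      refine ⟨by rw [← hperm.length_eq, hL5], ?_⟩
      have hpermu : L.Perm (PySem.Set.ofList dice) := by
        rw [List.perm_ext_iff_of_nodup hLp.nodup (PySem.Set.nodup_ofList dice)]
        intro a
        rw [PySem.Set.mem_ofList, ← hperm.mem_iff]
      rw [← hus, PySem.List.sorted_eq_of_perm_of_pairwise_lt _ _ _ hpermu hLp]
    rcases hL with h | h
    · obtain ⟨hd5, he⟩ := key [1, 2, 3, 4, 5] (by decide) (by decide) h
      subst he
      refine ⟨hd5, by decide, by decide, by decide⟩
    · obtain ⟨hd5, he⟩ := key [2, 3, 4, 5, 6] (by decide) (by decide) h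
      subst he
      refine ⟨hd5, by decide, by decide, by decide⟩
  · rintro ⟨hd5, hu5, hspan, hmin⟩
    have e4 : PySem.List.pyGetD us 4 0 = us[4]'(by omega) := by
      have h := hget 4 hu5 (by omega); simpa using h
    have e0 : PySem.List.pyGetD us 0 0 = us[0]'(by omega) := by
      have h := hget 0 hu5 (by omega); simpa using h
    rw [e4, e0] at hspan
    rw [e0] at hmin
    have hmono := List.pairwise_iff_getElem.mp hp
    have g01 : us[0]'(by omega) < us[1]'(by omega) := hmono 0 1 (by omega) (by omega) (by omega)
    have g12 : us[1]'(by omega) < us[2]'(by omega) := hmono 1 2 (by omega) (by omega) (by omega)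
    have g23 : us[2]'(by omega) < us[3]'(by omega) := hmono 2 3 (by omega) (by omega) (by omega)
    have g34 : us[3]'(by omega) < us[4]'(by omega) := hmono 3 4 (by omega) (by omega) (by omega)
    have consec : ∀ (k : ℕ) (hk : k < 5), us[k]'(by omega) = us[0]'(by omega) + (k : Int) := by
      intro k hk
      interval_cases k <;> omega
    have hform : us = [us[0]'(by omega), us[0]'(by omega) + 1, us[0]'(by omega) + 2,
        us[0]'(by omega) + 3, us[0]'(by omega) + 4] := by
      apply List.ext_getElem (by simp [hu5])
      intro k hk hk'
      have hk5 : k < 5 := by omega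
      rw [consec k hk5]
      interval_cases k <;> simp
    have husdice : us.Perm dice := by
      have hsub : us ⊆ dice := fun x hx => (hm x).mp hx
      exact (hp.nodup.subperm hsub).perm_of_length_le (by omega)
    have hsorted : PySem.List.sorted dice (fun x => x) false = us :=
      PySem.List.sorted_eq_of_perm_of_pairwise_lt _ _ _ husdice hp
    rcases hmin with h0 | h0
    · left; rw [hsorted, hform, h0]; decide
    · right; rw [hsorted, hform, h0]; decide

-- A's sorted-list comparison equals B's arithmetic characterisation
lemma pv_branch_large (dice : List Int) :
    (if (PySem.List.sorted dice (fun x => x) false == [1, 2, 3, 4, 5] ||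
         PySem.List.sorted dice (fun x => x) false == [2, 3, 4, 5, 6]) then (30 : Int) else 0) =
    (if decide (dice.length = 5) &&
        decide ((PySem.List.sorted (PySem.Set.ofList dice) (fun x => x) false).length = 5) &&
        (PySem.List.pyGetD (PySem.List.sorted (PySem.Set.ofList dice) (fun x => x) false) 4 0 -
           PySem.List.pyGetD (PySem.List.sorted (PySem.Set.ofList dice) (fun x => x) false) 0 0 == 4) &&
        (PySem.List.pyGetD (PySem.List.sorted (PySem.Set.ofList dice) (fun x => x) false) 0 0 == 1 ||
         PySem.List.pyGetD (PySem.List.sorted (PySem.Set.ofList dice) (fun x => x) false) 0 0 == 2)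
     then 30 else 0) := by
  have hp := PySem.List.sorted_ofList_pairwise_lt dice
  have hm : ∀ x : Int, x ∈ PySem.List.sorted (PySem.Set.ofList dice) (fun x => x) false ↔ x ∈ dice :=
    fun x => by rw [PySem.List.mem_sorted, PySem.Set.mem_ofList]
  have hiff := pv_large2_iff dice (PySem.List.sorted (PySem.Set.ofList dice) (fun x => x) false) hp hm rfl
  have hA : ((PySem.List.sorted dice (fun x => x) false == [1, 2, 3, 4, 5] ||
              PySem.List.sorted dice (fun x => x) false == [2, 3, 4, 5, 6]) = true)
      ↔ (PySem.List.sorted dice (fun x => x) false = [1, 2, 3, 4, 5] ∨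
         PySem.List.sorted dice (fun x => x) false = [2, 3, 4, 5, 6]) := by simp
  have hB : ((decide (dice.length = 5) &&
        decide ((PySem.List.sorted (PySem.Set.ofList dice) (fun x => x) false).length = 5) &&
        (PySem.List.pyGetD (PySem.List.sorted (PySem.Set.ofList dice) (fun x => x) false) 4 0 -
           PySem.List.pyGetD (PySem.List.sorted (PySem.Set.ofList dice) (fun x => x) false) 0 0 == 4) &&
        (PySem.List.pyGetD (PySem.List.sorted (PySem.Set.ofList dice) (fun x => x) false) 0 0 == 1 ||
         PySem.List.pyGetD (PySem.List.sorted (PySem.Set.ofList dice) (fun x => x) false) 0 0 == 2)) = true)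
      ↔ (dice.length = 5 ∧ (PySem.List.sorted (PySem.Set.ofList dice) (fun x => x) false).length = 5 ∧
         PySem.List.pyGetD (PySem.List.sorted (PySem.Set.ofList dice) (fun x => x) false) 4 0 -
           PySem.List.pyGetD (PySem.List.sorted (PySem.Set.ofList dice) (fun x => x) false) 0 0 = 4 ∧
         (PySem.List.pyGetD (PySem.List.sorted (PySem.Set.ofList dice) (fun x => x) false) 0 0 = 1 ∨
          PySem.List.pyGetD (PySem.List.sorted (PySem.Set.ofList dice) (fun x => x) false) 0 0 = 2)) := by
    simp [Bool.and_eq_true, and_assoc]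
  by_cases hP : PySem.List.sorted dice (fun x => x) false = [1, 2, 3, 4, 5] ∨
                PySem.List.sorted dice (fun x => x) false = [2, 3, 4, 5, 6]
  · rw [if_pos (hA.mpr hP), if_pos (hB.mpr (hiff.mp hP))]
  · rw [if_neg (fun h => hP (hA.mp h)), if_neg (fun h => hP (hiff.mpr (hB.mp h)))]

-- all dice equal the first iff the set of dice has at most one element
lemma pv_yacht_iff (dice : List Int) :
    (dice.all (fun d => some d == PySem.List.pyGet? dice 0) = true) ↔ (PySem.Set.ofList dice).length ≤ 1 := by
  cases dice with
  | nil => decide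
  | cons h t =>
    rw [List.all_eq_true]
    have hget : PySem.List.pyGet? (h :: t) 0 = some h := PySem.List.pyGet?_zero_cons h t
    constructor
    · intro hall
      have hmem : ∀ x ∈ PySem.Set.ofList (h :: t), x = h := by
        intro x hx
        have hx' : x ∈ h :: t := (PySem.Set.mem_ofList _ _).mp hx
        have := hall x hx'
        rw [hget] at this
        simpa using this
      have hnd := PySem.Set.nodup_ofList (h :: t)
      rcases hS : PySem.Set.ofList (h :: t) with _ | ⟨a, _ | ⟨b, r⟩⟩
      · simp
      · simp
      · exfalso
        rw [hS] at hmem hnd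
        have ha : a = h := hmem a (by simp)
        have hb : b = h := hmem b (by simp)
        rw [List.nodup_cons] at hnd
        exact hnd.1 (by simp [ha, hb])
    · intro hle d hd
      rw [hget]
      have hh : h ∈ PySem.Set.ofList (h :: t) := (PySem.Set.mem_ofList _ _).mpr (by simp)
      have hdm : d ∈ PySem.Set.ofList (h :: t) := (PySem.Set.mem_ofList _ _).mpr hd
      rcases hS : PySem.Set.ofList (h :: t) with _ | ⟨a, r⟩
      · rw [hS] at hh; simp at hh
      · rw [hS] at hh hdm hle
        have hr : r = [] := by
          rcases r with _ | _
          · rfl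
          · simp at hle
        subst hr
        simp only [List.mem_singleton] at hh hdm
        simp [hdm, ← hh]

lemma pv_branch_yacht (dice : List Int) :
    (if dice.all (fun d => some d == PySem.List.pyGet? dice 0) then 50 else 0) =
    (if PySem.Set.len (PySem.Set.ofList dice) ≤ 1 then (50 : Int) else 0) := by
  have hlen : PySem.Set.len (PySem.Set.ofList dice) = ((PySem.Set.ofList dice).length : Int) := rfl
  by_cases hP : (PySem.Set.ofList dice).length ≤ 1
  · rw [if_pos ((pv_yacht_iff dice).mpr hP), if_pos (by rw [hlen]; exact_mod_cast hP)]
  · rw [if_neg (fun h => hP ((pv_yacht_iff dice).mp h)),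
        if_neg (fun h => hP (by rw [hlen] at h; exact_mod_cast h))]

lemma pv_branch_four (dice : List Int) :
    pvAFour dice (PySem.List.pyRange 1 7 1) =
      (match (PySem.List.pyRange 1 7 1).filter
          (fun v => decide (4 ≤ (dice.foldl (fun d x => d.insert x (d.getD x 0 + 1)) (PySem.Dict.empty : PySem.Dict Int Int)).getD v 0)) with
       | q :: _ => 4 * q
       | [] => 0) := by
  rw [pv_four_loop]
  have hfc : ∀ v ∈ PySem.List.pyRange 1 7 1,
      (decide (4 ≤ ((dice.foldl (fun d x => d.insert x (d.getD x 0 + 1)) (PySem.Dict.empty : PySem.Dict Int Int)).getD v 0)))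
      = (decide (4 ≤ ((PySem.List.count dice v : ℕ) : Int))) := by
    intro v _
    rw [decide_eq_decide, pv_counts_getD, PySem.List.count_eq]
  rw [List.filter_congr hfc]

lemma pv_branch_full (dice : List Int) :
    (let fl := (PySem.List.pyRange 1 7 1).foldl
        (fun (p : Bool × Bool) v =>
          if PySem.List.count dice v == 3 then (true, p.2)
          else if PySem.List.count dice v == 2 then (p.1, true)
          else p) (false, false)
     if fl.1 && fl.2 then dice.sum else 0) =
    (let faces := (PySem.List.pyRange 1 7 1).map
        (fun v => (dice.foldl (fun d x => d.insert x (d.getD x 0 + 1)) (PySem.Dict.empty : PySem.Dict Int Int)).getD v 0)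
     if faces.contains 3 && faces.contains 2 then dice.sum else 0) := by
  simp only []
  rw [pv_flags (fun v => PySem.List.count dice v) (PySem.List.pyRange 1 7 1) false false]
  have hAiff : (((false || ((PySem.List.pyRange 1 7 1).any fun v => PySem.List.count dice v == 3)) &&
        (false || ((PySem.List.pyRange 1 7 1).any fun v => PySem.List.count dice v == 2))) = true)
      ↔ ((∃ v ∈ PySem.List.pyRange 1 7 1, List.count v dice = 3) ∧
         (∃ v ∈ PySem.List.pyRange 1 7 1, List.count v dice = 2)) := by
    simp [List.any_eq_true, PySem.List.count_eq]
  have hBiff : ∀ m : Int,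
      (((PySem.List.pyRange 1 7 1).map
          (fun v => (dice.foldl (fun d x => d.insert x (d.getD x 0 + 1)) (PySem.Dict.empty : PySem.Dict Int Int)).getD v 0)).contains
        m = true)
      ↔ (∃ v ∈ PySem.List.pyRange 1 7 1, ((List.count v dice : ℕ) : Int) = m) := by
    intro m
    rw [List.contains_iff_mem]
    constructor
    · rintro hm
      obtain ⟨v, hv, he⟩ := List.mem_map.mp hm
      rw [pv_counts_getD] at he
      exact ⟨v, hv, he⟩
    · rintro ⟨v, hv, he⟩
      exact List.mem_map.mpr ⟨v, hv, by rw [pv_counts_getD, he]⟩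
  have b3 : (∃ v ∈ PySem.List.pyRange 1 7 1, ((List.count v dice : ℕ) : Int) = 3)
      ↔ (∃ v ∈ PySem.List.pyRange 1 7 1, List.count v dice = 3) := by
    constructor
    · rintro ⟨v, hv, he⟩; exact ⟨v, hv, by exact_mod_cast he⟩
    · rintro ⟨v, hv, he⟩; exact ⟨v, hv, by exact_mod_cast he⟩
  have b2 : (∃ v ∈ PySem.List.pyRange 1 7 1, ((List.count v dice : ℕ) : Int) = 2)
      ↔ (∃ v ∈ PySem.List.pyRange 1 7 1, List.count v dice = 2) := by
    constructor
    · rintro ⟨v, hv, he⟩; exact ⟨v, hv, by exact_mod_cast he⟩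
    · rintro ⟨v, hv, he⟩; exact ⟨v, hv, by exact_mod_cast he⟩
  by_cases hP3 : ∃ v ∈ PySem.List.pyRange 1 7 1, List.count v dice = 3
  · by_cases hP2 : ∃ v ∈ PySem.List.pyRange 1 7 1, List.count v dice = 2
    · rw [if_pos (hAiff.mpr ⟨hP3, hP2⟩),
          if_pos (by rw [Bool.and_eq_true]
                     exact ⟨(hBiff 3).mpr (b3.mpr hP3), (hBiff 2).mpr (b2.mpr hP2)⟩)]
    · rw [if_neg (fun h => hP2 (hAiff.mp h).2),
          if_neg (fun h => hP2 (b2.mp ((hBiff 2).mp (Bool.and_eq_true _ _ |>.mp h).2)))]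
  · rw [if_neg (fun h => hP3 (hAiff.mp h).1),
        if_neg (fun h => hP3 (b3.mp ((hBiff 3).mp (Bool.and_eq_true _ _ |>.mp h).1)))]

-- ===== VERDICT (by name: the statement is the Claim_ definition above) =====
theorem calculate_possible_score_spec : Claim_equal_calculate_possible_score := by
  intro category dice _
  unfold Spec_calculate_possible_score calculate_possible_score calculate_possible_score_alt
  by_cases h1 : category = "Aces"
  · subst h1
    rw [pv_get_1]
    simp [pv_sum_filter, pv_counts_getD, PySem.List.count_eq]
  by_cases h2 : category = "Twos"
  · subst h2
    rw [pv_get_2]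
    simp [pv_sum_filter, pv_counts_getD, PySem.List.count_eq]
  by_cases h3 : category = "Threes"
  · subst h3
    rw [pv_get_3]
    simp [pv_sum_filter, pv_counts_getD, PySem.List.count_eq]
  by_cases h4 : category = "Fours"
  · subst h4
    rw [pv_get_4]
    simp [pv_sum_filter, pv_counts_getD, PySem.List.count_eq]
  by_cases h5 : category = "Fives"
  · subst h5
    rw [pv_get_5]
    simp [pv_sum_filter, pv_counts_getD, PySem.List.count_eq]
  by_cases h6 : category = "Sixes"
  · subst h6
    rw [pv_get_6]
    simp [pv_sum_filter, pv_counts_getD, PySem.List.count_eq]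
  by_cases h7 : category = "Choice"
  · subst h7
    rw [pv_get_7]
    simp
  by_cases h8 : category = "Four of a Kind"
  · subst h8
    rw [pv_get_8]
    simpa using pv_branch_four dice
  by_cases h9 : category = "Full House"
  · subst h9
    rw [pv_get_9]
    simpa using pv_branch_full dice
  by_cases h10 : category = "Small Straight"
  · subst h10
    rw [pv_get_10]
    simpa using pv_branch_small dice
  by_cases h11 : category = "Large Straight"
  · subst h11
    rw [pv_get_11]
    simpa using pv_branch_large dice
  by_cases h12 : category = "Yacht"
  · subst h12
    rw [pv_get_12]
    simpa using pv_branch_yacht dice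
  rw [pv_table_miss category _ _ _ _ _ _ _ _ _ _ _ _ h1 h2 h3 h4 h5 h6 h7 h8 h9 h10 h11 h12]
  simp [h1, h2, h3, h4, h5, h6, h7, h8, h9, h10, h11, h12]
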